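-- pv_equiv track=rewrite | github.com/Oklahomawhore/AgentStudio | ISV_eval/eval.py | get_matching_answer_key
-- ===== SOURCE A (Python) =====
-- from typing import Dict, List, Any, Union, Optional
--
-- def get_matching_answer_key(question_text: str, answers: Dict) -> Optional[str]:
--     """查找与问题文本匹配的答案键"""
--     # 首先尝试直接匹配
--     for key in answers:
--         if question_text in key:
--             return key
--
--     # 尝试忽略大小写和额外文本匹配
--     question_lower = question_text.lower()
--     for key in answers:
--         if question_lower in key.lower():
--             return key
--
--         # 处理可能有前缀的问题 (如 "Look at the shot screenshot and the video, answer...")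
--         if "answer this question" in key.lower() and question_lower in key.lower():
--             return key
--
--     return None
-- ===== SOURCE B (Python) =====
-- def get_matching_answer_key(question_text: str, answers) -> str | None:
--     """Single pass: return immediately on a case-sensitive match, remember the
--     first case-insensitive match as a fallback, return it after the loop."""
--     question_lower = question_text.lower()
--     fallback = None
--     for key in answers:
--         if question_text in key:
--             return key
--         if fallback is None and question_lower in key.lower():
--             fallback = key
--     return fallback
-- ===== Notes on version B (the rewrite author's own statement) =====
-- stated objective: simpler
-- what changed: Replaces A's two priority-ordered scans over the keys (plus a dead third branch) with one scan that returns exact matches immediately and carries the first case-insensitive match as a fallback variable returned after the loop.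
import Mathlib
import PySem

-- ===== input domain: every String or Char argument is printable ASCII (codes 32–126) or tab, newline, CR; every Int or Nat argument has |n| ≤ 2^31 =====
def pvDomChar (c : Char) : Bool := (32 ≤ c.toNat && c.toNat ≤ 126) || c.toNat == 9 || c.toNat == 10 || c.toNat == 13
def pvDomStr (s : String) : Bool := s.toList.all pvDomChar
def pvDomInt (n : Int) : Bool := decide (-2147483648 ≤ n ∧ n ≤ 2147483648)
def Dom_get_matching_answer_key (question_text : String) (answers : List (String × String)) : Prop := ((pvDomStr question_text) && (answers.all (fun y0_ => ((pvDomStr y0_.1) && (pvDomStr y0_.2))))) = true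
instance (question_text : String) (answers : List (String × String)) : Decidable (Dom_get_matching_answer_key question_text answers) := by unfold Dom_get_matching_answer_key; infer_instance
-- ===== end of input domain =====

-- ===== PORT A =====
-- B changes: one scan with a fallback variable instead of A's two priority-ordered scans (objective: simpler).
-- loop 1: `for key in answers: if question_text in key: return key`
def gmLoop1 (q : String) : List String → Option String
  | [] => none
  | k :: ks => if PySem.Str.isIn q k then some k else gmLoop1 q ks

-- loop 2: case-insensitive scan, with A's (dead) third branch kept verbatim
def gmLoop2 (ql : String) : List String → Option String
  | [] => none
  | k :: ks =>
    if PySem.Str.isIn ql (PySem.Str.lower k) then some k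
    else if PySem.Str.isIn "answer this question" (PySem.Str.lower k)
            && PySem.Str.isIn ql (PySem.Str.lower k) then some k
    else gmLoop2 ql ks

def get_matching_answer_key (question_text : String) (answers : List (String × String)) : Option String :=
  let keys := answers.map Prod.fst
  match gmLoop1 question_text keys with
  | some k => some k
  | none => gmLoop2 (PySem.Str.lower question_text) keys

-- ===== PORT B =====
-- single pass carrying the fallback (first case-insensitive match so far)
def gmAltLoop (q ql : String) : List String → Option String → Option String
  | [], fb => fb
  | k :: ks, fb =>
    if PySem.Str.isIn q k then some k
    else gmAltLoop q ql ks
      (if fb.isNone && PySem.Str.isIn ql (PySem.Str.lower k) then some k else fb)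

def get_matching_answer_key_alt (question_text : String) (answers : List (String × String)) : Option String :=
  gmAltLoop question_text (PySem.Str.lower question_text) (answers.map Prod.fst) none

-- ===== PRECONDITION & SPEC =====
def Spec_get_matching_answer_key (question_text : String) (answers : List (String × String)) (out : Option String) : Prop := out = get_matching_answer_key_alt question_text answers
instance (question_text : String) (answers : List (String × String)) (out : Option String) : Decidable (Spec_get_matching_answer_key question_text answers out) := by unfold Spec_get_matching_answer_key; infer_instance

-- ===== CLAIM =====
def Claim_equal_get_matching_answer_key : Prop := ∀ (question_text : String) (answers : List (String × String)), Dom_get_matching_answer_key question_text answers → Spec_get_matching_answer_key question_text answers (get_matching_answer_key question_text answers)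

-- ===== LEMMAS AND PROOFS =====
-- Invariant of B's single pass: it equals loop1's result, else the fallback, else loop2's result.
theorem gmAltLoop_eq (q ql : String) (ks : List String) (fb : Option String) :
    gmAltLoop q ql ks fb =
      match gmLoop1 q ks with
      | some j => some j
      | none => match fb with
        | some f => some f
        | none => gmLoop2 ql ks := by
  induction ks generalizing fb with
  | nil => cases fb <;> rfl
  | cons k ks ih =>
    by_cases h1 : PySem.Chars.isIn q.toList k.toList
    · simp [gmAltLoop, gmLoop1, h1]
    · by_cases h2 : PySem.Chars.isIn ql.toList (PySem.Chars.lower k.toList)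
      · cases fb <;> simp [gmAltLoop, gmLoop1, gmLoop2, h1, h2, ih]
      · cases fb <;> simp [gmAltLoop, gmLoop1, gmLoop2, h1, h2, ih]

-- ===== VERDICT =====
theorem get_matching_answer_key_spec : Claim_equal_get_matching_answer_key := by
  intro q answers _
  unfold Spec_get_matching_answer_key get_matching_answer_key get_matching_answer_key_alt
  rw [gmAltLoop_eq]
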